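-- pv_equiv track=rewrite | github.com/ksui01/MacCheeseGUI | gui_try3.py | plotClk
-- ===== SOURCE A (Python) =====
-- def plotClk(sigVal):
--     t = 0
--     timeVal = []
--     prevSigVal = sigVal[0]
--     for i in range(len(sigVal)):
--         currSigVal = sigVal[i]
--         if (i == 0):
--             timeVal.append(t)
--         elif (prevSigVal == currSigVal):
--             t = t + 1
--             timeVal.append(t)
--         else:
--             t = t + 1
--             timeVal.append(t)
--             timeVal.append(t)
--         if (i == len(sigVal) - 1):
--             t = t + 1
--             timeVal.append(t)
--         prevSigVal = sigVal[i]
--     return timeVal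
-- ===== SOURCE B (Python) =====
-- def plotClk(sigVal):
--     n = len(sigVal)
--     changes = {i for i in range(1, n) if sigVal[i] != sigVal[i - 1]}
--     timeVal = []
--     for i in range(n + 1):
--         timeVal.extend([i, i] if i in changes else [i])
--     return timeVal
-- ===== Notes on version B (the rewrite author's own statement) =====
-- stated objective: alternative
-- what changed: B first computes the set of change points (indices where the signal flips) in one pass, then in a second pass emits each time value 0..n, duplicated exactly at change points, replacing A's single-pass machine with running accumulator t, prevSigVal register and in-loop first/last special cases.
import Mathlib
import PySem

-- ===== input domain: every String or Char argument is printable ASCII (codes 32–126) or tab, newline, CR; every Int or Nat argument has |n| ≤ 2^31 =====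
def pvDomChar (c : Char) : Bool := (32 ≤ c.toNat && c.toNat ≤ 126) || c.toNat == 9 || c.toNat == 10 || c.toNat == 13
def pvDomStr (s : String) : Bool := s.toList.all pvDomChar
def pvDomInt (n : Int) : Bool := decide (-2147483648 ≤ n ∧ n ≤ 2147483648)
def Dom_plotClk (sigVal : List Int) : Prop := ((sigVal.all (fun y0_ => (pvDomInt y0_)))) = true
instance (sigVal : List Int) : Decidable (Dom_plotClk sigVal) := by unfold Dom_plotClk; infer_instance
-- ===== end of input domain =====

-- B replaces A's single-pass accumulator machine by two staged passes: a pass that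
-- collects the change-point indices, then a pass emitting 0..n with change points doubled
-- (objective: alternative decomposition; same cost).

-- ===== PORT A =====
-- loop body of A: state = (t, timeVal, prevSigVal); indices are in range, so getD is exact
def plotClkStep (sigVal : List Int) (n : Nat) (st : Int × List Int × Int) (i : Nat) :
    Int × List Int × Int :=
  let t := st.1
  let timeVal := st.2.1
  let prev := st.2.2
  let curr := sigVal.getD i 0
  let p : Int × List Int :=
    if i = 0 then (t, timeVal ++ [t])
    else if prev = curr then (t + 1, timeVal ++ [t + 1])
    else (t + 1, timeVal ++ [t + 1, t + 1])
  let q : Int × List Int :=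
    if i = n - 1 then (p.1 + 1, p.2 ++ [p.1 + 1]) else p
  (q.1, q.2, curr)

def plotClk (sigVal : List Int) : List Int :=
  match sigVal with
  | [] => []          -- Python raises IndexError reading the first element; excluded by Pre_plotClk
  | p0 :: _ =>
    ((List.range sigVal.length).foldl (plotClkStep sigVal sigVal.length) (0, [], p0)).2.1

-- ===== PORT B =====
-- pass 1: the set comprehension ranges over distinct indices, so the set is exactly this
-- filtered list (distinct elements in increasing order); indices in range, so getD is exact
def plotClkAltChanges (sigVal : List Int) : List Nat :=
  (List.range' 1 (sigVal.length - 1)).filter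
    (fun i => sigVal.getD i 0 ≠ sigVal.getD (i - 1) 0)

-- pass 2 body: timeVal.extend([i, i] if i in changes else [i])
def plotClkAltEmit (changes : List Nat) (tv : List Int) (i : Nat) : List Int :=
  tv ++ (if i ∈ changes then [(i : Int), (i : Int)] else [(i : Int)])

def plotClk_alt (sigVal : List Int) : List Int :=
  (List.range (sigVal.length + 1)).foldl (plotClkAltEmit (plotClkAltChanges sigVal)) []

-- ===== PRECONDITION & SPEC =====
-- Pre_ excludes only the empty list, on which A raises IndexError reading the first element.
def Pre_plotClk (sigVal : List Int) : Prop := sigVal ≠ []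
instance (sigVal : List Int) : Decidable (Pre_plotClk sigVal) := by unfold Pre_plotClk; infer_instance
def pvWitness_plotClk : List Int := ([1, 1, 0, 0, 1])

def Spec_plotClk (sigVal : List Int) (out : List Int) : Prop := out = plotClk_alt sigVal
instance (sigVal : List Int) (out : List Int) : Decidable (Spec_plotClk sigVal out) := by unfold Spec_plotClk; infer_instance

-- ===== CLAIM (what is proved, stated in full; the proofs are below) =====
def Claim_equal_plotClk : Prop := ∀ (sigVal : List Int), Dom_plotClk sigVal → Pre_plotClk sigVal → Spec_plotClk sigVal (plotClk sigVal)

-- ===== LEMMAS AND PROOFS =====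

-- membership in the change-point list
lemma mem_changes (sigVal : List Int) (i : Nat) :
    i ∈ plotClkAltChanges sigVal ↔
      (1 ≤ i ∧ i < sigVal.length ∧ sigVal.getD i 0 ≠ sigVal.getD (i - 1) 0) := by
  simp only [plotClkAltChanges, List.mem_filter, List.mem_range'_1, decide_eq_true_eq]
  constructor
  · rintro ⟨⟨h1, h2⟩, h3⟩
    exact ⟨h1, by omega, h3⟩
  · rintro ⟨h1, h2, h3⟩
    exact ⟨⟨h1, by omega⟩, h3⟩

-- invariant of A's fold over the first k indices (before the last index is reached):
-- t = k-1, timeVal is exactly B's partial emission over 0..k-1, prev = sigVal[k-1]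
lemma plotClk_inv (sigVal : List Int) (hs : sigVal ≠ [])
    (k : Nat) (h1 : 1 ≤ k) (h2 : k ≤ sigVal.length - 1) :
    (List.range k).foldl (plotClkStep sigVal sigVal.length) (0, [], sigVal.getD 0 0)
      = ((k : Int) - 1,
         (List.range k).foldl (plotClkAltEmit (plotClkAltChanges sigVal)) [],
         sigVal.getD (k - 1) 0) := by
  have hlen : 1 ≤ sigVal.length := by
    cases sigVal with
    | nil => exact absurd rfl hs
    | cons a l => simp
  induction k with
  | zero => omega
  | succ k ih =>
    rcases Nat.lt_or_ge k 1 with h | hk1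
    · have hk : k = 0 := by omega
      subst hk
      have hn : (0 : Nat) ≠ sigVal.length - 1 := by omega
      have h0 : (0 : Nat) ∉ plotClkAltChanges sigVal := by
        rw [mem_changes]; omega
      simp [List.range_succ, plotClkStep, plotClkAltEmit, hn, h0]
    · have hk2 : k ≤ sigVal.length - 1 := by omega
      have hkn : k ≠ sigVal.length - 1 := by omega
      have hk0 : k ≠ 0 := by omega
      rw [List.range_succ, List.foldl_append, List.foldl_append, ih hk1 hk2]
      simp only [List.foldl, plotClkStep, plotClkAltEmit]
      have hmem : k ∈ plotClkAltChanges sigVal ↔ sigVal.getD k 0 ≠ sigVal.getD (k - 1) 0 := by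
        rw [mem_changes]
        constructor
        · rintro ⟨_, _, h⟩; exact h
        · intro h; exact ⟨hk1, by omega, h⟩
      by_cases hc : sigVal.getD (k - 1) 0 = sigVal.getD k 0
      · have hnm : k ∉ plotClkAltChanges sigVal := by
          rw [hmem]; exact fun h => h hc.symm
        simp only [hc, if_neg hkn, if_neg hk0, if_neg hnm]
        refine Prod.ext (by push_cast; ring) (Prod.ext (by simp) (by norm_num))
      · have hm : k ∈ plotClkAltChanges sigVal := by
          rw [hmem]; exact fun h => hc h.symm
        simp only [if_neg hc, if_neg hkn, if_neg hk0, if_pos hm]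
        refine Prod.ext (by push_cast; ring) (Prod.ext (by simp) (by norm_num))

-- ===== VERDICT =====
theorem plotClk_spec : Claim_equal_plotClk := by
  intro sigVal _ hpre
  unfold Spec_plotClk
  match sigVal, hpre with
  | p0 :: rest, _ =>
    have hget0 : (p0 :: rest).getD 0 0 = p0 := rfl
    rcases Nat.lt_or_ge (p0 :: rest).length 2 with hn | hlen
    · -- single element
      have : rest = [] := by
        cases rest with
        | nil => rfl
        | cons a l => simp at hn
      subst this
      have h0 : (0 : Nat) ∉ plotClkAltChanges [p0] := by rw [mem_changes]; omega
      have h1 : (1 : Nat) ∉ plotClkAltChanges [p0] := by rw [mem_changes]; omega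
      simp [plotClk, plotClk_alt, plotClkStep, plotClkAltEmit, List.range_succ, h0, h1]
    · -- length ≥ 2: peel the last two emissions / the last A index
      set n := (p0 :: rest).length with hn
      have hinv := plotClk_inv (p0 :: rest) (by simp) (n - 1) (by omega) (le_refl _)
      rw [hget0] at hinv
      show ((List.range n).foldl (plotClkStep (p0 :: rest) n) (0, [], p0)).2.1
        = (List.range (n + 1)).foldl (plotClkAltEmit (plotClkAltChanges (p0 :: rest))) []
      have hrA : List.range n = List.range (n - 1) ++ [n - 1] := by
        conv_lhs => rw [show n = (n - 1) + 1 by omega]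
        rw [List.range_succ]
      have hrB : List.range (n + 1) = (List.range (n - 1) ++ [n - 1]) ++ [n] := by
        rw [List.range_succ, hrA]
      rw [hrA, hrB, List.foldl_append, List.foldl_append, List.foldl_append, hinv]
      have hne0 : n - 1 ≠ 0 := by omega
      have hmem : (n - 1) ∈ plotClkAltChanges (p0 :: rest) ↔
          (p0 :: rest).getD (n - 1) 0 ≠ (p0 :: rest).getD (n - 1 - 1) 0 := by
        rw [mem_changes]
        constructor
        · rintro ⟨_, _, h⟩; exact h
        · intro h; exact ⟨by omega, by omega, h⟩
      have hnmem : n ∉ plotClkAltChanges (p0 :: rest) := by rw [mem_changes]; omega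
      simp only [List.foldl, plotClkStep, plotClkAltEmit]
      by_cases hc : (p0 :: rest).getD (n - 1 - 1) 0 = (p0 :: rest).getD (n - 1) 0
      · have hnm : (n - 1) ∉ plotClkAltChanges (p0 :: rest) := by
          rw [hmem]; exact fun h => h hc.symm
        simp only [hc, if_neg hne0, if_neg hnm, if_neg hnmem]
        have hc1 : ((n - 1 : Nat) : Int) - 1 + 1 = ((n - 1 : Nat) : Int) := by ring
        have hc2 : ((n - 1 : Nat) : Int) + 1 = (n : Int) := by omega
        simp [hc1, hc2]
      · have hm : (n - 1) ∈ plotClkAltChanges (p0 :: rest) := by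
          rw [hmem]; exact fun h => hc h.symm
        simp only [if_neg hc, if_neg hne0, if_pos hm, if_neg hnmem]
        have hc1 : ((n - 1 : Nat) : Int) - 1 + 1 = ((n - 1 : Nat) : Int) := by ring
        have hc2 : ((n - 1 : Nat) : Int) + 1 = (n : Int) := by omega
        simp [hc1, hc2]
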